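-- pv_equiv track=rewrite | github.com/tokamak-network/py_zkp | py_zkp/groth16/qap_creator_lcm.py | create_solution_polynomials
-- ===== SOURCE A (Python) =====
-- def multiply_polys(a, b):
--     o = [0] * (len(a) + len(b) - 1)
--     for i in range(len(a)):
--         for j in range(len(b)):
--             o[i + j] += a[i] * b[j]
--     return o
--
-- def add_polys(a, b, subtract=False):
--     o = [0] * max(len(a), len(b))
--     for i in range(len(a)):
--         o[i] += a[i]
--     for i in range(len(b)):
--         o[i] += b[i] * (-1 if subtract else 1) # Reuse the function structure for subtraction
--     return o
--
-- def subtract_polys(a, b):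
--     return add_polys(a, b, subtract=True)
--
-- def create_solution_polynomials(r, new_A, new_B, new_C):
--
--     # r = [r1(x), r2(x), r3(x), r4(x), r5(x), r6(x)]
--     # A(x) = [a1(x), a2(x), a3(x), a4(x), a5(x), a6(x)]
--     # B(x) = [b1(x), b2(x), b3(x), b4(x), b5(x), b6(x)]
--     # C(x) = [c1(x), c2(x), c3(x), c4(x), c5(x), c6(x)]
--
--     # Apoly = r.A(x)
--     #       = r1(x)*a1(x) + r2(x)*a2(x) + ... + r6(x)*a6(x)
--     Apoly = []
--     for rval, a in zip(r, new_A):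
--         Apoly = add_polys(Apoly, multiply_polys([rval], a))
--
--     # Bpoly = r.B(x)
--     # Bpoly = r1(x)*b1(x) + r2(x)*b2(x) + ... + r6(x)*b6(x)
--     Bpoly = []
--     for rval, b in zip(r, new_B):
--         Bpoly = add_polys(Bpoly, multiply_polys([rval], b))
--
--     # Cpoly = r.C(x)
--     # Cpoly = r1(x)*c1(x) + r2(x)*c2(x) + ... + r6(x)*c6(x)
--     Cpoly = []
--     for rval, c in zip(r, new_C):
--         Cpoly = add_polys(Cpoly, multiply_polys([rval], c))
--
--     # o = r.A(x)*r.B(x)-r.C(x)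
--     o = subtract_polys(multiply_polys(Apoly, Bpoly), Cpoly)
--     # for i in range(1, len(new_A[0]) + 1):
--     #     assert abs(eval_poly(o, i)) < 10**-10, (eval_poly(o, i), i)
--
--     # Return r.A(x), r.B(x), r.C(x), r.A(x)*r.B(x)-r.C(x) = o
--     return Apoly, Bpoly, Cpoly, o
-- ===== SOURCE B (Python) =====
-- def create_solution_polynomials(r, new_A, new_B, new_C):
--     # Direct coefficient formulas: column-wise linear combination, then one convolution pass.
--     def combo(M):
--         pairs = list(zip(r, M))
--         L = max((len(p) for _, p in pairs), default=0)
--         return [sum(rv * p[k] for rv, p in pairs if k < len(p)) for k in range(L)]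
--     Apoly, Bpoly, Cpoly = combo(new_A), combo(new_B), combo(new_C)
--     la, lb = len(Apoly), len(Bpoly)
--     prod = [sum(Apoly[i] * Bpoly[k - i] for i in range(la) if i <= k and k - i < lb)
--             for k in range(la + lb - 1)]
--     o = [(prod[k] if k < len(prod) else 0) - (Cpoly[k] if k < len(Cpoly) else 0)
--          for k in range(max(len(prod), len(Cpoly)))]
--     return Apoly, Bpoly, Cpoly, o
-- ===== Notes on version B (the rewrite author's own statement) =====
-- stated objective: alternative
-- what changed: Replaces A's repeated in-place add_polys/multiply_polys accumulation loops by direct closed-form coefficient expressions: each linear combination is computed column-wise (one sum per coefficient over the zipped rows) and the product and subtraction are each a single comprehension using the convolution formula, with no intermediate mutable zero-arrays.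
import Mathlib
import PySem

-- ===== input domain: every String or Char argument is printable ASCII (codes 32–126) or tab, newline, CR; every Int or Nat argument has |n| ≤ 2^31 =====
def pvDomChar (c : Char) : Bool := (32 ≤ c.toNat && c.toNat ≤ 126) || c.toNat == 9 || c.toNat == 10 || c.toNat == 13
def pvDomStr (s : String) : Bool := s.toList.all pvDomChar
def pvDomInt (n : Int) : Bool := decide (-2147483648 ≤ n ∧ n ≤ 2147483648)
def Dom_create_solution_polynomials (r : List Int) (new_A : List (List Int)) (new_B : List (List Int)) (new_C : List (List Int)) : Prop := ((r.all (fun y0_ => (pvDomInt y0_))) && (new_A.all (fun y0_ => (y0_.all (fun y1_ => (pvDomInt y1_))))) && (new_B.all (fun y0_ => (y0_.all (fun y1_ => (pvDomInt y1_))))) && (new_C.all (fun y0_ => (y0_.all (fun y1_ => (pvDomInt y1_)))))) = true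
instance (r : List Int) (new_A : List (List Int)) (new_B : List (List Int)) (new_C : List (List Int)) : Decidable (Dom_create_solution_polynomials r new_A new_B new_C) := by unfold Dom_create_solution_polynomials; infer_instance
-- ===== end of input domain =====

-- B replaces A's repeated add_polys/multiply_polys accumulation loops by direct coefficient
-- formulas (a column-wise linear combination and one convolution pass); objective: alternative.

-- ===== PORT A =====
def multiply_polys (a b : List Int) : List Int :=
  (List.range a.length).foldl
    (fun o i =>
      (List.range b.length).foldl
        (fun o j => o.set (i + j) (o.getD (i + j) 0 + a.getD i 0 * b.getD j 0)) o)
    (List.replicate (a.length + b.length - 1) (0 : Int))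

def add_polys (a b : List Int) (subtract : Bool) : List Int :=
  (List.range b.length).foldl
    (fun o i => o.set i (o.getD i 0 + b.getD i 0 * (if subtract then -1 else 1)))
    ((List.range a.length).foldl
      (fun o i => o.set i (o.getD i 0 + a.getD i 0))
      (List.replicate (max a.length b.length) (0 : Int)))

def subtract_polys (a b : List Int) : List Int := add_polys a b true

def create_solution_polynomials (r : List Int) (new_A : List (List Int)) (new_B : List (List Int)) (new_C : List (List Int)) : List Int × List Int × List Int × List Int :=
  let Apoly := (r.zip new_A).foldl (fun acc p => add_polys acc (multiply_polys [p.1] p.2) false) []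
  let Bpoly := (r.zip new_B).foldl (fun acc p => add_polys acc (multiply_polys [p.1] p.2) false) []
  let Cpoly := (r.zip new_C).foldl (fun acc p => add_polys acc (multiply_polys [p.1] p.2) false) []
  (Apoly, Bpoly, Cpoly, subtract_polys (multiply_polys Apoly Bpoly) Cpoly)

-- ===== PORT B =====
def csp_combo (r : List Int) (M : List (List Int)) : List Int :=
  let pairs := r.zip M
  let L := pairs.foldl (fun m p => max m p.2.length) 0
  (List.range L).map (fun k =>
    pairs.foldl (fun s p => s + if k < p.2.length then p.1 * p.2.getD k 0 else 0) 0)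

def create_solution_polynomials_alt (r : List Int) (new_A : List (List Int)) (new_B : List (List Int)) (new_C : List (List Int)) : List Int × List Int × List Int × List Int :=
  let Apoly := csp_combo r new_A
  let Bpoly := csp_combo r new_B
  let Cpoly := csp_combo r new_C
  let la := Apoly.length
  let lb := Bpoly.length
  let prod := (List.range (la + lb - 1)).map (fun k =>
    (List.range la).foldl
      (fun s i => s + if i ≤ k ∧ k - i < lb then Apoly.getD i 0 * Bpoly.getD (k - i) 0 else 0) 0)
  let o := (List.range (max prod.length Cpoly.length)).map (fun k =>
    (if k < prod.length then prod.getD k 0 else 0) - (if k < Cpoly.length then Cpoly.getD k 0 else 0))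
  (Apoly, Bpoly, Cpoly, o)

-- ===== PRECONDITION & SPEC =====
def Spec_create_solution_polynomials (r : List Int) (new_A : List (List Int)) (new_B : List (List Int)) (new_C : List (List Int)) (out : List Int × List Int × List Int × List Int) : Prop := out = create_solution_polynomials_alt r new_A new_B new_C
instance (r : List Int) (new_A : List (List Int)) (new_B : List (List Int)) (new_C : List (List Int)) (out : List Int × List Int × List Int × List Int) : Decidable (Spec_create_solution_polynomials r new_A new_B new_C out) := by unfold Spec_create_solution_polynomials; infer_instance

-- ===== CLAIM (what is proved, stated in full; the proofs are below) =====
def Claim_equal_create_solution_polynomials : Prop := ∀ (r : List Int) (new_A : List (List Int)) (new_B : List (List Int)) (new_C : List (List Int)), Dom_create_solution_polynomials r new_A new_B new_C → Spec_create_solution_polynomials r new_A new_B new_C (create_solution_polynomials r new_A new_B new_C)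

-- ===== LEMMAS AND PROOFS =====

lemma csp_getD_set (l : List Int) (i k : Nat) (v : Int) :
    (l.set i v).getD k 0 = if i = k ∧ i < l.length then v else l.getD k 0 := by
  simp only [List.getD, List.getElem?_set]
  by_cases h1 : i = k
  · subst h1
    by_cases h2 : i < l.length
    · simp [h2]
    · simp [h2]
  · simp [h1]

lemma csp_getD_replicate (n k : Nat) : (List.replicate n (0 : Int)).getD k 0 = 0 := by
  simp [List.getD]

-- the 'o[c+j] += f j for j in range m' loop
lemma csp_setAddLoop (f : Nat → Int) (c : Nat) (m : Nat) :
    ∀ (o : List Int),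
      ((List.range m).foldl (fun o j => o.set (c + j) (o.getD (c + j) 0 + f j)) o).length = o.length ∧
      ∀ k, ((List.range m).foldl (fun o j => o.set (c + j) (o.getD (c + j) 0 + f j)) o).getD k 0
           = o.getD k 0 + if c ≤ k ∧ k < c + m ∧ k < o.length then f (k - c) else 0 := by
  induction m with
  | zero =>
    intro o
    refine ⟨rfl, fun k => ?_⟩
    rw [List.range_zero, List.foldl_nil, if_neg (by omega)]
    ring
  | succ n ih =>
    intro o
    obtain ⟨hlen, hget⟩ := ih o
    rw [List.range_succ, List.foldl_append, List.foldl_cons, List.foldl_nil]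
    refine ⟨by rw [List.length_set, hlen], fun k => ?_⟩
    rw [csp_getD_set]
    by_cases hc : c + n = k ∧ c + n < ((List.range n).foldl (fun o j => o.set (c + j) (o.getD (c + j) 0 + f j)) o).length
    · rw [if_pos hc]
      obtain ⟨hk, hlt⟩ := hc
      rw [hlen] at hlt
      subst hk
      rw [hget (c + n), if_neg (by omega), if_pos ⟨by omega, by omega, hlt⟩]
      have he : c + n - c = n := by omega
      rw [he]
      ring
    · rw [if_neg hc, hget k]
      rw [hlen] at hc
      congr 1
      refine if_congr ?_ rfl rfl
      constructor
      · rintro ⟨h1, h2, h3⟩; exact ⟨h1, by omega, h3⟩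
      · rintro ⟨h1, h2, h3⟩
        refine ⟨h1, ?_, h3⟩
        by_contra hn
        exact hc ⟨by omega, by omega⟩

-- the 'o[i] += g i for i in range m' loop (offset 0)
lemma csp_addLoop (g : Nat → Int) (m : Nat) (o : List Int) :
    ((List.range m).foldl (fun o i => o.set i (o.getD i 0 + g i)) o).length = o.length ∧
    ∀ k, ((List.range m).foldl (fun o i => o.set i (o.getD i 0 + g i)) o).getD k 0
         = o.getD k 0 + if k < m ∧ k < o.length then g k else 0 := by
  have he : (fun (o : List Int) i => o.set i (o.getD i 0 + g i))
      = (fun (o : List Int) j => o.set (0 + j) (o.getD (0 + j) 0 + g j)) := by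
    funext o i; simp
  rw [he]
  obtain ⟨h1, h2⟩ := csp_setAddLoop g 0 m o
  refine ⟨h1, fun k => ?_⟩
  rw [h2 k]
  congr 1
  exact if_congr (by omega) rfl rfl

lemma csp_add_polys_spec (a b : List Int) (s : Bool) :
    (add_polys a b s).length = max a.length b.length ∧
    ∀ k, (add_polys a b s).getD k 0 = a.getD k 0 + b.getD k 0 * (if s then -1 else 1) := by
  unfold add_polys
  obtain ⟨hl1, hg1⟩ := csp_addLoop (fun i => a.getD i 0) a.length
      (List.replicate (max a.length b.length) (0 : Int))
  obtain ⟨hl2, hg2⟩ := csp_addLoop (fun i => b.getD i 0 * (if s then -1 else 1)) b.length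
      ((List.range a.length).foldl (fun o i => o.set i (o.getD i 0 + a.getD i 0))
        (List.replicate (max a.length b.length) (0 : Int)))
  rw [hl1, List.length_replicate] at hl2 hg2
  refine ⟨hl2, fun k => ?_⟩
  rw [hg2 k, hg1 k, csp_getD_replicate, zero_add, List.length_replicate]
  have h1 : (if k < a.length ∧ k < max a.length b.length then a.getD k 0 else 0) = a.getD k 0 := by
    by_cases h : k < a.length
    · rw [if_pos ⟨h, by omega⟩]
    · rw [if_neg (by omega), List.getD_eq_default _ _ (by omega)]
  have h2 : (if k < b.length ∧ k < max a.length b.length then b.getD k 0 * (if s then -1 else 1) else 0)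
      = b.getD k 0 * (if s then -1 else 1) := by
    by_cases h : k < b.length
    · rw [if_pos ⟨h, by omega⟩]
    · rw [if_neg (by omega), List.getD_eq_default _ _ (by omega : b.length ≤ k), zero_mul]
  rw [h1, h2]

-- the outer loop of multiply_polys, over the first n rows
lemma csp_multLoop (a b : List Int) (n : Nat) :
    ∀ (o : List Int),
      ((List.range n).foldl
        (fun o i => (List.range b.length).foldl
          (fun o j => o.set (i + j) (o.getD (i + j) 0 + a.getD i 0 * b.getD j 0)) o) o).length
        = o.length ∧
      ∀ k, ((List.range n).foldl
        (fun o i => (List.range b.length).foldl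
          (fun o j => o.set (i + j) (o.getD (i + j) 0 + a.getD i 0 * b.getD j 0)) o) o).getD k 0
        = o.getD k 0 + ((List.range n).map (fun i =>
            if i ≤ k ∧ k < i + b.length ∧ k < o.length then a.getD i 0 * b.getD (k - i) 0 else 0)).sum := by
  induction n with
  | zero => intro o; simp
  | succ n ih =>
    intro o
    obtain ⟨hlen, hget⟩ := ih o
    rw [List.range_succ, List.foldl_append, List.foldl_cons, List.foldl_nil]
    obtain ⟨hl, hg⟩ := csp_setAddLoop (fun j => a.getD n 0 * b.getD j 0) n b.length
      ((List.range n).foldl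
        (fun o i => (List.range b.length).foldl
          (fun o j => o.set (i + j) (o.getD (i + j) 0 + a.getD i 0 * b.getD j 0)) o) o)
    rw [hlen] at hl hg
    refine ⟨hl, fun k => ?_⟩
    rw [hg k, hget k, List.map_append, List.sum_append, List.map_singleton, List.sum_singleton,
      add_assoc]

def csp_conv (a b : List Int) (k : Nat) : Int :=
  ((List.range a.length).map (fun i =>
    if i ≤ k ∧ k - i < b.length then a.getD i 0 * b.getD (k - i) 0 else 0)).sum

lemma csp_mult_length (a b : List Int) :
    (multiply_polys a b).length = a.length + b.length - 1 := by
  unfold multiply_polys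
  rw [(csp_multLoop a b a.length _).1, List.length_replicate]

lemma csp_mult_getD (a b : List Int) (k : Nat) (hk : k < a.length + b.length - 1) :
    (multiply_polys a b).getD k 0 = csp_conv a b k := by
  unfold multiply_polys
  rw [(csp_multLoop a b a.length (List.replicate (a.length + b.length - 1) (0 : Int))).2 k,
    csp_getD_replicate, zero_add]
  unfold csp_conv
  congr 1
  apply List.map_congr_left
  intro i hi
  rw [List.mem_range] at hi
  rw [List.length_replicate]
  exact if_congr (by omega) rfl rfl

lemma csp_scalmul (rv : Int) (a : List Int) :
    (multiply_polys [rv] a).length = a.length ∧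
    ∀ k, (multiply_polys [rv] a).getD k 0 = rv * a.getD k 0 := by
  have hl : (multiply_polys [rv] a).length = a.length := by
    rw [csp_mult_length]; simp
  refine ⟨hl, fun k => ?_⟩
  by_cases hk : k < a.length
  · rw [csp_mult_getD [rv] a k (by simp; omega)]
    unfold csp_conv
    simp only [List.length_singleton, List.range_one, List.map_cons, List.map_nil,
      List.sum_cons, List.sum_nil, add_zero]
    rw [if_pos ⟨Nat.zero_le k, by simpa using hk⟩]
    simp
  · rw [List.getD_eq_default _ _ (by omega : (multiply_polys [rv] a).length ≤ k),
      List.getD_eq_default _ _ (by omega : a.length ≤ k), mul_zero]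

lemma csp_combo_fold (ps : List (Int × List Int)) :
    ∀ (acc : List Int),
      ((ps.foldl (fun acc p => add_polys acc (multiply_polys [p.1] p.2) false) acc).length
        = ps.foldl (fun m p => max m p.2.length) acc.length) ∧
      ∀ k, (ps.foldl (fun acc p => add_polys acc (multiply_polys [p.1] p.2) false) acc).getD k 0
        = ps.foldl (fun s p => s + if k < p.2.length then p.1 * p.2.getD k 0 else 0) (acc.getD k 0) := by
  induction ps with
  | nil => intro acc; exact ⟨rfl, fun _ => rfl⟩
  | cons p ps ih =>
    intro acc
    obtain ⟨hlen, hget⟩ := ih (add_polys acc (multiply_polys [p.1] p.2) false)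
    have hstepl : (add_polys acc (multiply_polys [p.1] p.2) false).length = max acc.length p.2.length := by
      rw [(csp_add_polys_spec acc (multiply_polys [p.1] p.2) false).1, (csp_scalmul p.1 p.2).1]
    have hstepg : ∀ k, (add_polys acc (multiply_polys [p.1] p.2) false).getD k 0
        = acc.getD k 0 + (if k < p.2.length then p.1 * p.2.getD k 0 else 0) := by
      intro k
      rw [(csp_add_polys_spec acc (multiply_polys [p.1] p.2) false).2 k, (csp_scalmul p.1 p.2).2 k]
      have : (if k < p.2.length then p.1 * p.2.getD k 0 else 0) = p.1 * p.2.getD k 0 := by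
        by_cases h : k < p.2.length
        · rw [if_pos h]
        · rw [if_neg h, List.getD_eq_default _ _ (by omega : p.2.length ≤ k), mul_zero]
      rw [this, if_neg (Bool.false_ne_true), mul_one]
    refine ⟨?_, fun k => ?_⟩
    · rw [List.foldl_cons, List.foldl_cons, hlen, hstepl]
    · rw [List.foldl_cons, List.foldl_cons, hget k, hstepg k]

lemma csp_combo_eq (r : List Int) (M : List (List Int)) :
    (r.zip M).foldl (fun acc p => add_polys acc (multiply_polys [p.1] p.2) false) [] = csp_combo r M := by
  obtain ⟨hlen, hget⟩ := csp_combo_fold (r.zip M) []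
  apply List.ext_getElem
  · rw [hlen]
    simp [csp_combo]
  · intro k h1 h2
    have hr : (csp_combo r M)[k]'h2
        = (r.zip M).foldl (fun s p => s + if k < p.2.length then p.1 * p.2.getD k 0 else 0) 0 := by
      simp [csp_combo]
    rw [hr, ← List.getD_eq_getElem _ 0 h1, hget k]
    rfl

lemma csp_final_eq (Ap Bp Cp : List Int) :
    subtract_polys (multiply_polys Ap Bp) Cp =
    (List.range (max ((List.range (Ap.length + Bp.length - 1)).map (fun k =>
        (List.range Ap.length).foldl
          (fun s i => s + if i ≤ k ∧ k - i < Bp.length then Ap.getD i 0 * Bp.getD (k - i) 0 else 0) 0)).length Cp.length)).map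
      (fun k =>
        (if k < ((List.range (Ap.length + Bp.length - 1)).map (fun k =>
            (List.range Ap.length).foldl
              (fun s i => s + if i ≤ k ∧ k - i < Bp.length then Ap.getD i 0 * Bp.getD (k - i) 0 else 0) 0)).length
          then ((List.range (Ap.length + Bp.length - 1)).map (fun k =>
            (List.range Ap.length).foldl
              (fun s i => s + if i ≤ k ∧ k - i < Bp.length then Ap.getD i 0 * Bp.getD (k - i) 0 else 0) 0)).getD k 0 else 0)
        - (if k < Cp.length then Cp.getD k 0 else 0)) := by
  set prod := (List.range (Ap.length + Bp.length - 1)).map (fun k =>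
      (List.range Ap.length).foldl
        (fun s i => s + if i ≤ k ∧ k - i < Bp.length then Ap.getD i 0 * Bp.getD (k - i) 0 else 0) 0) with hprod
  have hprodlen : prod.length = Ap.length + Bp.length - 1 := by
    rw [hprod, List.length_map, List.length_range]
  have hprodget : ∀ k, k < prod.length → prod.getD k 0 = csp_conv Ap Bp k := by
    intro k hk
    rw [hprodlen] at hk
    rw [hprod, List.getD_eq_getElem _ 0 (by rw [List.length_map, List.length_range]; exact hk)]
    simp only [List.getElem_map, List.getElem_range]
    rw [PySem.List.foldl_add, zero_add]
    rfl
  obtain ⟨hsl, hsg⟩ := csp_add_polys_spec (multiply_polys Ap Bp) Cp true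
  apply List.ext_getElem
  · rw [show subtract_polys (multiply_polys Ap Bp) Cp = add_polys (multiply_polys Ap Bp) Cp true from rfl,
      hsl, List.length_map, List.length_range, csp_mult_length, hprodlen]
  · intro k h1 h2
    rw [← List.getD_eq_getElem _ 0 h1,
      show subtract_polys (multiply_polys Ap Bp) Cp = add_polys (multiply_polys Ap Bp) Cp true from rfl,
      hsg k]
    have hkmax : k < max prod.length Cp.length := by
      rw [List.length_map, List.length_range] at h2
      exact h2
    have hmget : (if k < prod.length then prod.getD k 0 else 0) = (multiply_polys Ap Bp).getD k 0 := by
      by_cases hk : k < prod.length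
      · rw [if_pos hk, hprodget k hk, csp_mult_getD Ap Bp k (by omega)]
      · rw [if_neg hk, List.getD_eq_default _ _ (by rw [csp_mult_length]; omega)]
    have hcget : (if k < Cp.length then Cp.getD k 0 else 0) = Cp.getD k 0 := by
      by_cases hk : k < Cp.length
      · rw [if_pos hk]
      · rw [if_neg hk, List.getD_eq_default _ _ (by omega)]
    rw [List.getElem_map, List.getElem_range, hmget, hcget]
    simp
    ring

-- ===== VERDICT (by name: the statement is the Claim_ definition above) =====
theorem create_solution_polynomials_spec : Claim_equal_create_solution_polynomials := by
  unfold Claim_equal_create_solution_polynomials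
  intro r new_A new_B new_C _
  unfold Spec_create_solution_polynomials
  show create_solution_polynomials r new_A new_B new_C = create_solution_polynomials_alt r new_A new_B new_C
  simp only [create_solution_polynomials, create_solution_polynomials_alt]
  rw [csp_combo_eq r new_A, csp_combo_eq r new_B, csp_combo_eq r new_C]
  rw [csp_final_eq (csp_combo r new_A) (csp_combo r new_B) (csp_combo r new_C)]
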